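-- pv_equiv track=rewrite | github.com/mathispesai/IndIngUgent | informatica/Python/spiegelwoord.py | is_spiegelwoord
-- ===== SOURCE A (Python) =====
-- def is_spiegelwoord(woord: str) -> bool:
--     voorwaarde = False
--     tellen = 0
--     for letter in woord:
--         if letter in "BCDEHIKOX":
--             tellen += 1
--     if tellen == len(woord):
--         voorwaarde = True
--     return voorwaarde
-- ===== SOURCE B (Python) =====
-- def is_spiegelwoord(woord: str) -> bool:
--     if woord == "":
--         return True
--     if woord[0] not in "BCDEHIKOX":
--         return False
--     return is_spiegelwoord(woord[1:])
-- ===== Notes on version B (the rewrite author's own statement) =====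
-- stated objective: alternative
-- what changed: Replaced the full counting pass (count matching letters, then compare the count with the length) by a short-circuiting structural recursion that returns False at the first non-mirror letter and True on the empty string.
import Mathlib
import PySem

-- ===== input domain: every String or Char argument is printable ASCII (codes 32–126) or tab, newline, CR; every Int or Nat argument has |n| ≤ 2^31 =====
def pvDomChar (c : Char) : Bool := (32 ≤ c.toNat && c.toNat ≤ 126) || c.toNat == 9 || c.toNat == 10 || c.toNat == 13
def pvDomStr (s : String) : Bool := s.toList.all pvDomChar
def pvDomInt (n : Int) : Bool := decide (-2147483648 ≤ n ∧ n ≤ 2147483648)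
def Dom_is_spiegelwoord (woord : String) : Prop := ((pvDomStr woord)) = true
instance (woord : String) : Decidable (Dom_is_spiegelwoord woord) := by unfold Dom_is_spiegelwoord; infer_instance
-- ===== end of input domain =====

-- B replaces A's count-then-compare-to-length pass by a short-circuiting recursion (objective: alternative).

-- ===== PORT A =====
def is_spiegelwoord (woord : String) : Bool :=
  let voorwaarde := false
  let tellen : Int :=
    woord.toList.foldl (fun tellen letter =>
      if "BCDEHIKOX".toList.contains letter then tellen + 1 else tellen) 0
  let voorwaarde := if tellen = PySem.Str.len woord then true else voorwaarde
  voorwaarde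

-- ===== PORT B =====
-- recursion on the character list mirrors Source B recursing on woord[1:]
def is_spiegelwoord_alt_go : List Char → Bool
  | [] => true
  | c :: cs => if ¬ ("BCDEHIKOX".toList.contains c) then false else is_spiegelwoord_alt_go cs

def is_spiegelwoord_alt (woord : String) : Bool :=
  is_spiegelwoord_alt_go woord.toList

-- ===== PRECONDITION & SPEC =====
def Spec_is_spiegelwoord (woord : String) (out : Bool) : Prop := out = is_spiegelwoord_alt woord
instance (woord : String) (out : Bool) : Decidable (Spec_is_spiegelwoord woord out) := by unfold Spec_is_spiegelwoord; infer_instance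

-- ===== CLAIM (what is proved, stated in full; the proofs are below) =====
def Claim_equal_is_spiegelwoord : Prop := ∀ (woord : String), Dom_is_spiegelwoord woord → Spec_is_spiegelwoord woord (is_spiegelwoord woord)

-- ===== LEMMAS AND PROOFS =====
theorem pv_count_fold (p : Char → Bool) (l : List Char) (k : Int) :
    l.foldl (fun t c => if p c then t + 1 else t) k = k + (l.countP p : Int) := by
  induction l generalizing k with
  | nil => simp
  | cons c cs ih =>
    simp only [List.foldl_cons, List.countP_cons, ih]
    by_cases h : p c
    · simp [h]; omega
    · simp [h]

theorem pv_A_iff (woord : String) :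
    is_spiegelwoord woord = true ↔ ∀ c ∈ woord.toList, "BCDEHIKOX".toList.contains c := by
  unfold is_spiegelwoord
  simp only [pv_count_fold, zero_add, PySem.Str.len_eq]
  split_ifs with hif
  · simp only [true_iff]
    intro c hc
    have hnat : woord.toList.countP (fun c => "BCDEHIKOX".toList.contains c) = woord.toList.length := by
      exact_mod_cast hif
    exact List.countP_eq_length.mp hnat c hc
  · simp only [false_iff]
    intro h
    exact hif (by exact_mod_cast List.countP_eq_length.mpr h)

theorem pv_B_go_iff (l : List Char) :
    is_spiegelwoord_alt_go l = true ↔ ∀ c ∈ l, "BCDEHIKOX".toList.contains c := by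
  induction l with
  | nil => simp [is_spiegelwoord_alt_go]
  | cons c cs ih =>
    simp only [is_spiegelwoord_alt_go, List.forall_mem_cons]
    by_cases h : ("BCDEHIKOX".toList.contains c) = true
    · rw [if_neg (not_not_intro h), ih]
      exact ⟨fun hall => ⟨h, hall⟩, fun hp => hp.2⟩
    · rw [if_pos h]
      simp only [Bool.false_eq_true, false_iff]
      exact fun hp => h hp.1

-- ===== VERDICT (by name: the statement is the Claim_ definition above) =====
theorem is_spiegelwoord_spec : Claim_equal_is_spiegelwoord := by
  intro woord _
  unfold Spec_is_spiegelwoord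
  by_cases hA : is_spiegelwoord woord = true
  · rw [hA]
    exact ((pv_B_go_iff woord.toList).mpr ((pv_A_iff woord).mp hA)).symm
  · have hB : is_spiegelwoord_alt woord ≠ true :=
      fun hb => hA ((pv_A_iff woord).mpr ((pv_B_go_iff woord.toList).mp hb))
    simp only [Bool.not_eq_true] at hA hB
    rw [hA, hB]
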